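-- pv_equiv track=rewrite | github.com/backbay-labs/hush | scripts/smoke_snippets.py | split_go_imports
-- ===== SOURCE A (Python) =====
-- def split_go_imports(code: str) -> tuple[str, str]:
--     stripped = code.lstrip()
--     if not stripped.startswith("import"):
--         return "", code
--
--     lines = code.splitlines()
--     import_lines: list[str] = []
--     body_lines: list[str] = []
--     collecting_imports = True
--     block_depth = 0
--     for line in lines:
--         if collecting_imports:
--             import_lines.append(line)
--             block_depth += line.count("(")
--             block_depth -= line.count(")")
--             if line.startswith("import ") and "(" not in line:
--                 collecting_imports = False
--             elif block_depth == 0 and line.strip() == ")":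
--                 collecting_imports = False
--         else:
--             body_lines.append(line)
--
--     if body_lines and body_lines[0].strip() == "":
--         body_lines = body_lines[1:]
--     return "\n".join(import_lines), "\n".join(body_lines)
-- ===== SOURCE B (Python) =====
-- def split_go_imports(code: str) -> tuple[str, str]:
--     stripped = code.lstrip()
--     if not stripped.startswith("import"):
--         return "", code
--     lines = code.splitlines()
--     depths = []
--     s = 0
--     for line in lines:
--         s += line.count("(") - line.count(")")
--         depths.append(s)
--     flags = [(line.startswith("import ") and "(" not in line)
--              or (d == 0 and line.strip() == ")")
--              for line, d in zip(lines, depths)]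
--     k = flags.index(True) + 1 if True in flags else len(lines)
--     body = lines[k:]
--     if body and body[0].strip() == "":
--         body = body[1:]
--     return "\n".join(lines[:k]), "\n".join(body)
-- ===== Notes on version B (the rewrite author's own statement) =====
-- stated objective: alternative
-- what changed: B replaces A's stateful early-exit loop with a flag and two growing accumulator lists by a staged vectorized pipeline: it materializes the full prefix-depth array, maps the stop predicate over zip(lines, depths) into a boolean flag vector, takes the boundary as flags.index(True)+1 (or len(lines)), and slices; no collecting flag, no accumulators, no break.
import Mathlib
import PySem

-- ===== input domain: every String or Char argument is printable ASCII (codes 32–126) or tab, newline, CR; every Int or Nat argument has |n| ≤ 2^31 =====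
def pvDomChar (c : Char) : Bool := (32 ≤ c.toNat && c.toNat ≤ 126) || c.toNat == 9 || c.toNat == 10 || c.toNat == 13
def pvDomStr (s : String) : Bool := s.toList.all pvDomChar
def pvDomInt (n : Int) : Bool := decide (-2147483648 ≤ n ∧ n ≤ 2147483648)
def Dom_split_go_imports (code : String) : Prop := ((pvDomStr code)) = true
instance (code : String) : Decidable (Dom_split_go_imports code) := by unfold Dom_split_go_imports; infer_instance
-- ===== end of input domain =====

-- B replaces A's stateful early-exit two-accumulator loop by a staged pipeline: prefix-depth array,
-- boolean stop-flag vector over zip(lines, depths), boundary = index of first True, then slicing (objective: alternative).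

-- ===== PORT A =====
-- loop body of A's 'for line in lines' with state (import_lines, body_lines, collecting_imports, block_depth)
def pvStepA (st : List String × List String × Bool × Int) (line : String) :
    List String × List String × Bool × Int :=
  let imp := st.1; let body := st.2.1; let collecting := st.2.2.1; let depth := st.2.2.2
  if collecting then
    let imp := imp ++ [line]
    let depth := depth + (PySem.Str.count line "(" : Int) - (PySem.Str.count line ")" : Int)
    if PySem.Str.startswith line "import " && !(PySem.Str.isIn "(" line) then
      (imp, body, false, depth)
    else if depth == 0 && PySem.Str.strip line == ")" then
      (imp, body, false, depth)
    else
      (imp, body, true, depth)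
  else
    (imp, body ++ [line], collecting, depth)

-- the shared three Python lines 'if body and body[0].strip() == "": body = body[1:]' (identical in A and B)
def pvTrim (body : List String) : List String :=
  match body with
  | b0 :: rest => if PySem.Str.strip b0 == "" then rest else b0 :: rest
  | [] => []

def split_go_imports (code : String) : String × String :=
  if !(PySem.Str.startswith (PySem.Str.lstrip code) "import") then ("", code)
  else
    let lines := PySem.Str.splitlines code
    let r := lines.foldl pvStepA ([], [], true, 0)
    (PySem.Str.join "\n" r.1, PySem.Str.join "\n" (pvTrim r.2.1))

-- ===== PORT B =====
def split_go_imports_alt (code : String) : String × String :=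
  if !(PySem.Str.startswith (PySem.Str.lstrip code) "import") then ("", code)
  else
    let lines := PySem.Str.splitlines code
    -- 'depths = []; s = 0; for line in lines: s += …; depths.append(s)'
    let depths := (lines.foldl (fun (p : List Int × Int) line =>
        let s := p.2 + (PySem.Str.count line "(" : Int) - (PySem.Str.count line ")" : Int)
        (p.1 ++ [s], s)) ([], 0)).1
    -- the boolean flag vector over zip(lines, depths)
    let flags := (lines.zip depths).map (fun p =>
        (PySem.Str.startswith p.1 "import " && !(PySem.Str.isIn "(" p.1)) ||
        ((p.2 == 0) && (PySem.Str.strip p.1 == ")")))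
    -- 'k = flags.index(True) + 1 if True in flags else len(lines)' (index? = none iff True ∉ flags)
    let k := match PySem.List.index? flags true with
      | some i => i + 1
      | none => lines.length
    (PySem.Str.join "\n" (lines.take k), PySem.Str.join "\n" (pvTrim (lines.drop k)))

-- ===== PRECONDITION & SPEC =====
def Spec_split_go_imports (code : String) (out : String × String) : Prop := out = split_go_imports_alt code
instance (code : String) (out : String × String) : Decidable (Spec_split_go_imports code out) := by unfold Spec_split_go_imports; infer_instance

-- ===== CLAIM =====
def Claim_equal_split_go_imports : Prop := ∀ (code : String), Dom_split_go_imports code → Spec_split_go_imports code (split_go_imports code)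

-- ===== LEMMAS AND PROOFS =====

-- proof-side boundary index: number of lines in the import block under A's stop logic
def pvFindK : List String → Int → Nat
  | [], _ => 0
  | line :: rest, depth =>
    let depth := depth + (PySem.Str.count line "(" : Int) - (PySem.Str.count line ")" : Int)
    if (PySem.Str.startswith line "import " && !(PySem.Str.isIn "(" line)) ||
       (depth == 0 && PySem.Str.strip line == ")") then 1
    else 1 + pvFindK rest depth

-- proof-side prefix-depth list
def pvDepths : List String → Int → List Int
  | [], _ => []
  | line :: rest, s =>
    let s := s + (PySem.Str.count line "(" : Int) - (PySem.Str.count line ")" : Int)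
    s :: pvDepths rest s

-- once collecting = false, A's loop only appends every remaining line to body
theorem pvFoldA_false (lines : List String) (imp body : List String) (depth : Int) :
    lines.foldl pvStepA (imp, body, false, depth) = (imp, body ++ lines, false, depth) := by
  induction lines generalizing body with
  | nil => simp
  | cons line rest ih =>
      simp only [List.foldl_cons, pvStepA]
      simpa using ih (body ++ [line])

-- while collecting, A's loop produces exactly the take/drop at the boundary index
theorem pvFoldA_true (lines : List String) (imp body : List String) (depth : Int) :
    (lines.foldl pvStepA (imp, body, true, depth)).1
      = imp ++ lines.take (pvFindK lines depth) ∧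
    (lines.foldl pvStepA (imp, body, true, depth)).2.1
      = body ++ lines.drop (pvFindK lines depth) := by
  induction lines generalizing imp body depth with
  | nil => simp [pvFindK]
  | cons line rest ih =>
      simp only [List.foldl_cons, pvStepA, pvFindK, if_true]
      by_cases h1 : (PySem.Str.startswith line "import " && !(PySem.Str.isIn "(" line)) = true
      · have hc : ((PySem.Str.startswith line "import " && !(PySem.Str.isIn "(" line)) ||
            ((depth + (PySem.Str.count line "(" : Int) - (PySem.Str.count line ")" : Int)) == 0
              && PySem.Str.strip line == ")")) = true := by rw [h1]; rfl
        rw [if_pos h1, if_pos hc, pvFoldA_false]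
        simp
      · by_cases h2 : (((depth + (PySem.Str.count line "(" : Int) - (PySem.Str.count line ")" : Int)) == 0
            && PySem.Str.strip line == ")")) = true
        · have hc : ((PySem.Str.startswith line "import " && !(PySem.Str.isIn "(" line)) ||
              ((depth + (PySem.Str.count line "(" : Int) - (PySem.Str.count line ")" : Int)) == 0
                && PySem.Str.strip line == ")")) = true := by rw [h2]; simp
          rw [if_neg h1, if_pos h2, if_pos hc, pvFoldA_false]
          simp
        · have hc : ¬ (((PySem.Str.startswith line "import " && !(PySem.Str.isIn "(" line)) ||
              ((depth + (PySem.Str.count line "(" : Int) - (PySem.Str.count line ")" : Int)) == 0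
                && PySem.Str.strip line == ")")) = true) := by
            intro hor
            simp only [Bool.or_eq_true] at hor
            rcases hor with h | h
            · exact h1 h
            · exact h2 h
          rw [if_neg h1, if_neg h2, if_neg hc]
          obtain ⟨ihl, ihr⟩ := ih (imp ++ [line]) body
            (depth + (PySem.Str.count line "(" : Int) - (PySem.Str.count line ")" : Int))
          rw [ihl, ihr]
          constructor
          · rw [Nat.add_comm 1, List.take_succ_cons]; simp
          · rw [Nat.add_comm 1, List.drop_succ_cons]

-- B's accumulate loop builds exactly the prefix-depth list
theorem pvDepths_foldl (lines : List String) (acc : List Int) (s : Int) :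
    (lines.foldl (fun (p : List Int × Int) line =>
        let s := p.2 + (PySem.Str.count line "(" : Int) - (PySem.Str.count line ")" : Int)
        (p.1 ++ [s], s)) (acc, s)).1 = acc ++ pvDepths lines s := by
  induction lines generalizing acc s with
  | nil => simp [pvDepths]
  | cons line rest ih =>
      simp only [List.foldl_cons, pvDepths]
      rw [ih]
      simp

-- shifting the first-match boundary by one line
theorem pvMatchShift (o : Option Nat) (n : Nat) :
    (match Option.map (fun x => x + 1) o with | some i => i + 1 | none => n + 1)
      = 1 + (match o with | some i => i + 1 | none => n) := by
  cases o with
  | none => simp only [Option.map_none]; exact Nat.add_comm n 1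
  | some i => simp only [Option.map_some]; exact Nat.add_comm (i + 1) 1

-- the flag vector's first True sits exactly at the boundary index
theorem pvIndex_flags (lines : List String) (s : Int) :
    (match PySem.List.index? ((lines.zip (pvDepths lines s)).map (fun p =>
        (PySem.Str.startswith p.1 "import " && !(PySem.Str.isIn "(" p.1)) ||
        ((p.2 == 0) && (PySem.Str.strip p.1 == ")")))) true with
      | some i => i + 1
      | none => lines.length) = pvFindK lines s := by
  induction lines generalizing s with
  | nil => simp [pvDepths, pvFindK, PySem.List.index?_eq_idxOf?, List.idxOf?]
  | cons line rest ih =>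
      simp only [pvDepths, pvFindK, List.zip_cons_cons, List.map_cons]
      by_cases h : ((PySem.Str.startswith line "import " && !(PySem.Str.isIn "(" line)) ||
          ((s + (PySem.Str.count line "(" : Int) - (PySem.Str.count line ")" : Int)) == 0
            && PySem.Str.strip line == ")")) = true
      · rw [if_pos h, h, PySem.List.index?_cons_self]
      · rw [if_neg h]
        have hne : ((PySem.Str.startswith line "import " && !(PySem.Str.isIn "(" line)) ||
            ((s + (PySem.Str.count line "(" : Int) - (PySem.Str.count line ")" : Int)) == 0
              && PySem.Str.strip line == ")")) ≠ true := h
        rw [PySem.List.index?_cons_of_ne _ hne]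
        simp only [List.length_cons]
        rw [pvMatchShift, ih]

-- ===== VERDICT =====
theorem split_go_imports_spec : Claim_equal_split_go_imports := by
  intro code _
  unfold Spec_split_go_imports split_go_imports split_go_imports_alt
  by_cases hs : (PySem.Str.startswith (PySem.Str.lstrip code) "import") = true
  · have hc : ¬ ((!(PySem.Str.startswith (PySem.Str.lstrip code) "import")) = true) := by
      rw [hs]; simp
    rw [if_neg hc, if_neg hc]
    obtain ⟨h1, h2⟩ := pvFoldA_true (PySem.Str.splitlines code) [] [] 0
    simp only [List.nil_append] at h1 h2
    simp only [pvDepths_foldl (PySem.Str.splitlines code) [] 0, List.nil_append,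
      pvIndex_flags (PySem.Str.splitlines code) 0, h1, h2]
  · simp only [Bool.not_eq_true] at hs
    have hc : (!(PySem.Str.startswith (PySem.Str.lstrip code) "import")) = true := by
      rw [hs]; rfl
    rw [if_pos hc, if_pos hc]
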